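-- pv_equiv track=rewrite | github.com/ja1m1l/SE-FDS-PRACTICALS | Asg2.py | freqq
-- ===== SOURCE A (Python) =====
-- def freqq(FDS):
--     max = 0
--     rs = FDS[0]
--     for i in FDS:
--         freq = FDS.count(i)
--         if freq > max:
--            max = freq
--            rs = i
--     return rs
-- ===== SOURCE B (Python) =====
-- def freqq(FDS):
--     rs = FDS[0]
--     counts = {}
--     for x in FDS:
--         counts[x] = counts.get(x, 0) + 1
--     max = 0
--     for k, c in counts.items():
--         if c > max:
--             max = c
--             rs = k
--     return rs
-- ===== Notes on version B (the rewrite author's own statement) =====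
-- stated objective: faster
-- what changed: A rescans the whole list with FDS.count for every element (quadratic); B builds a frequency dict in one pass and then scans only the unique keys in first-occurrence order with a strict '>' update, preserving the first-encountered tie-break.
import Mathlib
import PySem

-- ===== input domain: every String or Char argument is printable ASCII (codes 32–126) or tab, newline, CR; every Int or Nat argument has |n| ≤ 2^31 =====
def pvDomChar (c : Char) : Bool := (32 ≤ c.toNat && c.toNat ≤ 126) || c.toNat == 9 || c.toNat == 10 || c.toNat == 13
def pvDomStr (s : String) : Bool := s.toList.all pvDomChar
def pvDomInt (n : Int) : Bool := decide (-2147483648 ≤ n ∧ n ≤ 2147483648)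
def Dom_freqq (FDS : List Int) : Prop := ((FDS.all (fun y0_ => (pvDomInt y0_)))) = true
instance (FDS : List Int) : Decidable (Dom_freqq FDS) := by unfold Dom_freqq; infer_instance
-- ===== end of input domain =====

-- B replaces A's quadratic per-element FDS.count rescan with a one-pass frequency
-- dict followed by a scan over the unique keys (first-occurrence order); faster.


-- ===== PORT A =====
-- state = (max, rs); FDS[0] via pyGet? (IndexError on [] is excluded by Pre_)
def freqq (FDS : List Int) : Int :=
  let rs0 : Int := (PySem.List.pyGet? FDS 0).getD 0
  (FDS.foldl (fun (s : Int × Int) i =>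
      let freq : Int := (PySem.List.count FDS i : Int)
      if freq > s.1 then (freq, i) else s) (0, rs0)).2

-- ===== PORT B =====
-- rs = FDS[0]; counts built by dict insert; then a scan over counts.items()
def freqq_alt (FDS : List Int) : Int :=
  let rs0 : Int := (PySem.List.pyGet? FDS 0).getD 0
  let counts : PySem.Dict Int Int :=
    FDS.foldl (fun d x => d.insert x (d.getD x 0 + 1)) PySem.Dict.empty
  (counts.items.foldl (fun (s : Int × Int) kc =>
      if kc.2 > s.1 then (kc.2, kc.1) else s) (0, rs0)).2

-- ===== PRECONDITION & SPEC =====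
-- A (and B) evaluate FDS[0]: both raise IndexError on the empty list.
def Pre_freqq (FDS : List Int) : Prop := FDS ≠ []
instance (FDS : List Int) : Decidable (Pre_freqq FDS) := by unfold Pre_freqq; infer_instance
def pvWitness_freqq : List Int := [3, 1, 1, 2]
def Spec_freqq (FDS : List Int) (out : Int) : Prop := out = freqq_alt FDS
instance (FDS : List Int) (out : Int) : Decidable (Spec_freqq FDS out) := by unfold Spec_freqq; infer_instance

-- ===== CLAIM (what is proved, stated in full; the proofs are below) =====
def Claim_equal_freqq : Prop := ∀ (FDS : List Int), Dom_freqq FDS → Pre_freqq FDS → Spec_freqq FDS (freqq FDS)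

-- ===== LEMMAS AND PROOFS =====

-- the common step: A's loop body, as a function of the element only
def fqStep (FDS : List Int) (s : Int × Int) (i : Int) : Int × Int :=
  if (PySem.List.count FDS i : Int) > s.1 then ((PySem.List.count FDS i : Int), i) else s

theorem fqStep_fst_le (FDS : List Int) (s : Int × Int) (i : Int) :
    s.1 ≤ (fqStep FDS s i).1 ∧ (PySem.List.count FDS i : Int) ≤ (fqStep FDS s i).1 := by
  unfold fqStep; split_ifs with h <;> constructor <;> omega

theorem fqStep_noop (FDS : List Int) (s : Int × Int) (i : Int)
    (h : (PySem.List.count FDS i : Int) ≤ s.1) : fqStep FDS s i = s := by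
  unfold fqStep; split_ifs with h' <;> [omega; rfl]

-- folding the step over already-dominated elements does nothing
theorem fqFold_noop (FDS : List Int) (S : List Int) (s : Int × Int)
    (hS : ∀ i ∈ S, (PySem.List.count FDS i : Int) ≤ s.1) :
    S.foldl (fqStep FDS) s = s := by
  induction S with
  | nil => rfl
  | cons x xs ih =>
      simp only [List.foldl_cons]
      rw [fqStep_noop FDS s x (hS x (by simp))]
      exact ih (fun i hi => hS i (by simp [hi]))

theorem exists_update_append {α : Type} [BEq α] [LawfulBEq α] (l : List α) (S : PySem.Set α) :
    ∃ D, PySem.Set.update S l = S ++ D := by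
  induction l generalizing S with
  | nil => exact ⟨[], (List.append_nil S).symm⟩
  | cons x xs ih =>
      have hstep : PySem.Set.update S (x :: xs) = PySem.Set.update (S.add x) xs := rfl
      obtain ⟨D, hD⟩ := ih (S.add x)
      by_cases hx : x ∈ S
      · exact ⟨D, by rw [hstep, hD]; simp [PySem.Set.add, PySem.Set.contains, hx]⟩
      · refine ⟨x :: D, ?_⟩
        rw [hstep, hD]; simp [PySem.Set.add, PySem.Set.contains, hx]

-- MAIN: folding A's step over a list equals folding it over the deduped list,
-- provided every element of the already-seen set S is dominated by s.1
theorem fqFold_dedup (FDS : List Int) (xs : List Int) (S : PySem.Set Int) (s : Int × Int)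
    (hS : ∀ i ∈ S, (PySem.List.count FDS i : Int) ≤ s.1) :
    xs.foldl (fqStep FDS) s = (PySem.Set.update S xs).foldl (fqStep FDS) s := by
  induction xs generalizing S s with
  | nil => exact (fqFold_noop FDS S s hS).symm
  | cons x xs ih =>
      have hstep : PySem.Set.update S (x :: xs) = PySem.Set.update (S.add x) xs := rfl
      have hmono := fqStep_fst_le FDS s x
      have hS' : ∀ i ∈ S.add x, (PySem.List.count FDS i : Int) ≤ (fqStep FDS s x).1 := by
        intro i hi
        rcases (PySem.Set.mem_add S x i).1 hi with h | h
        · exact le_trans (hS i h) hmono.1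
        · subst h; exact hmono.2
      simp only [List.foldl_cons]
      rw [ih (S.add x) (fqStep FDS s x) hS', hstep]
      by_cases hx : x ∈ S
      · have hadd : S.add x = S := by simp [PySem.Set.add, PySem.Set.contains, hx]
        rw [hadd, fqStep_noop FDS s x (hS x hx)]
      · have hadd : S.add x = S ++ [x] := by simp [PySem.Set.add, PySem.Set.contains, hx]
        obtain ⟨D, hD⟩ := exists_update_append xs (S.add x)
        rw [hD, hadd]
        simp only [List.append_assoc, List.foldl_append, List.foldl_cons, List.foldl_nil]
        rw [fqFold_noop FDS S s hS,
            fqFold_noop FDS S (fqStep FDS s x)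
              (fun i hi => le_trans (hS i hi) hmono.1),
            fqStep_noop FDS (fqStep FDS s x) x hmono.2]

-- ===== VERDICT (by name: the statement is the Claim_ definition above) =====
theorem freqq_spec : Claim_equal_freqq := by
  intro FDS _ _
  unfold Spec_freqq freqq freqq_alt
  simp only [PySem.Dict.foldl_insert_getD_add_one_eq_counter, PySem.Dict.items_counter,
    List.foldl_map]
  show (List.foldl (fqStep FDS) ((0 : Int), (PySem.List.pyGet? FDS 0).getD 0) FDS).2
      = (List.foldl (fqStep FDS) ((0 : Int), (PySem.List.pyGet? FDS 0).getD 0)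
          (PySem.Set.update [] FDS)).2
  exact congrArg Prod.snd
    (fqFold_dedup FDS FDS [] ((0 : Int), (PySem.List.pyGet? FDS 0).getD 0) (by simp))
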